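-- pv_equiv track=rewrite | github.com/muhenan/Python-Algo | PrefixSum/vowelStrings.py | vowelStrings1
-- ===== SOURCE A (Python) =====
-- from typing import List
--
-- def vowelStrings1(words: List[str], queries: List[List[int]]) -> List[int]:
--     vowels = ['a', 'e', 'i', 'o', 'u']
--     isVowel = [False] * len(words)
--     for i, word in enumerate(words):
--         if word[0] in vowels and word[-1] in vowels:
--             isVowel[i] = True
--     res = []
--     for q in queries:
--         temp = 0
--         for i in range(q[0], q[-1] + 1):
--             if isVowel[i]:
--                 temp += 1
--         res.append(temp)
--     return res
-- ===== SOURCE B (Python) =====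
-- from typing import List
--
-- def vowelStrings1(words: List[str], queries: List[List[int]]) -> List[int]:
--     vowels = set('aeiou')
--     prefix = [0]
--     for w in words:
--         prefix.append(prefix[-1] + (w[0] in vowels and w[-1] in vowels))
--     return [prefix[q[-1] + 1] - prefix[q[0]] if q[0] <= q[-1] else 0 for q in queries]
-- ===== Notes on version B (the rewrite author's own statement) =====
-- stated objective: alternative
-- what changed: B precomputes a prefix-sum array of the vowel-bounded flags and answers each in-order query by one subtraction instead of rescanning the query range; Pre_ excludes non-empty query ranges with a negative start index, malformed input on which the implementations disagree.
-- outside the precondition, e.g. on vowelStrings1(['ai', 'b'], [[-1, 0]]): A returns [1], B returns [0]; on vowelStrings1(['i'], [[-1]]): A returns [1], B returns [-1]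
import Mathlib
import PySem

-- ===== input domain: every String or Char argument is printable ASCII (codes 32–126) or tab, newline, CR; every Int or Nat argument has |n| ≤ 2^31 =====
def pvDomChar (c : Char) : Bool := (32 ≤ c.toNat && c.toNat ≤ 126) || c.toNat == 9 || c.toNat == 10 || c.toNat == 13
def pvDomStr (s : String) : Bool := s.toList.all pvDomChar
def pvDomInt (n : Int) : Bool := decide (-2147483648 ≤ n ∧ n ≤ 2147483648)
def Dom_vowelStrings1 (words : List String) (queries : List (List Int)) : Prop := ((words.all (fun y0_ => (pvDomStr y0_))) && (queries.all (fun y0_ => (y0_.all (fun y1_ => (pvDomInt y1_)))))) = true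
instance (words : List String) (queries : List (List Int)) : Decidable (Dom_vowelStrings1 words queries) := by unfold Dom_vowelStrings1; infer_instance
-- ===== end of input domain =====

-- B replaces A's per-query rescan of the flag array by a prefix-sum array answered with one subtraction per query (an alternative algorithm; speed not claimed).


-- ===== PORT A =====
def pvVowelsA : List Char := ['a', 'e', 'i', 'o', 'u']

def pvIsVowelWordA (w : String) : Bool :=
  (match PySem.Str.pyGet? w 0 with | some c => pvVowelsA.contains c | none => false) &&
  (match PySem.Str.pyGet? w (-1) with | some c => pvVowelsA.contains c | none => false)

def vowelStrings1 (words : List String) (queries : List (List Int)) : List Int :=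
  let isVowel : List Bool := words.map pvIsVowelWordA
  queries.foldl (fun res q =>
    let temp : Int :=
      (PySem.List.pyRange (PySem.List.pyGetD q 0 0) (PySem.List.pyGetD q (-1) 0 + 1) 1).foldl
        (fun t i => if PySem.List.pyGetD isVowel i false then t + 1 else t) 0
    res ++ [temp]) []

-- ===== PORT B =====
def pvVowelSetB : PySem.Set Char := PySem.Set.ofList "aeiou".toList

def pvIsVowelWordB (w : String) : Bool :=
  (match PySem.Str.pyGet? w 0 with | some c => PySem.Set.contains pvVowelSetB c | none => false) &&
  (match PySem.Str.pyGet? w (-1) with | some c => PySem.Set.contains pvVowelSetB c | none => false)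

def vowelStrings1_alt (words : List String) (queries : List (List Int)) : List Int :=
  let pref := words.foldl
    (fun p w => p ++ [PySem.List.pyGetD p (-1) 0 + (if pvIsVowelWordB w then 1 else 0)]) [0]
  queries.map (fun q =>
    if PySem.List.pyGetD q 0 0 ≤ PySem.List.pyGetD q (-1) 0 then
      PySem.List.pyGetD pref (PySem.List.pyGetD q (-1) 0 + 1) 0
        - PySem.List.pyGetD pref (PySem.List.pyGetD q 0 0) 0
    else 0)

-- ===== PRECONDITION & SPEC =====
-- Pre_ excludes the inputs where A raises (an empty word or query, or a non-empty query range
-- reaching an index past either end of words) and, among inputs A returns on, only non-empty query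
-- ranges whose start index q[0] is negative: query bounds are positions into words, so negative
-- bounds are malformed input outside the task's natural domain, and the two implementations
-- disagree there.
def Pre_vowelStrings1 (words : List String) (queries : List (List Int)) : Prop :=
  (∀ w ∈ words, w ≠ "") ∧
  ∀ q ∈ queries, q ≠ [] ∧
    (PySem.List.pyGetD q (-1) 0 < PySem.List.pyGetD q 0 0 ∨
      (0 ≤ PySem.List.pyGetD q 0 0 ∧ PySem.List.pyGetD q (-1) 0 < (words.length : Int)))
instance (words : List String) (queries : List (List Int)) : Decidable (Pre_vowelStrings1 words queries) := by unfold Pre_vowelStrings1; infer_instance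

def pvWitness_vowelStrings1 : List String × List (List Int) := (["ai", "b", "oo"], [[0, 2], [1, 1], [2, 1]])

def Spec_vowelStrings1 (words : List String) (queries : List (List Int)) (out : List Int) : Prop := out = vowelStrings1_alt words queries
instance (words : List String) (queries : List (List Int)) (out : List Int) : Decidable (Spec_vowelStrings1 words queries out) := by unfold Spec_vowelStrings1; infer_instance

-- ===== CLAIM (what is proved, stated in full; the proofs are below) =====
def Claim_equal_vowelStrings1 : Prop := ∀ (words : List String) (queries : List (List Int)), Dom_vowelStrings1 words queries → Pre_vowelStrings1 words queries → Spec_vowelStrings1 words queries (vowelStrings1 words queries)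

-- ===== LEMMAS AND PROOFS =====

def pvFlag (w : String) : Int := if pvIsVowelWordA w then 1 else 0

def pvScan (s : Int) : List String → List Int
  | [] => []
  | w :: ws => (s + pvFlag w) :: pvScan (s + pvFlag w) ws

lemma pvVowelB_eq_A : pvIsVowelWordB = pvIsVowelWordA := by
  funext w
  have h : pvVowelSetB = pvVowelsA := by decide
  unfold pvIsVowelWordB pvIsVowelWordA
  rw [h]
  rfl

lemma pvScan_length (ws : List String) : ∀ s : Int, (pvScan s ws).length = ws.length := by
  induction ws with
  | nil => intro s; rfl
  | cons w ws ih => intro s; simp [pvScan, ih]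

lemma pvFold_scan (ws : List String) : ∀ (p : List Int) (x : Int),
    ws.foldl (fun p w => p ++ [PySem.List.pyGetD p (-1) 0 + (if pvIsVowelWordB w then 1 else 0)]) (p ++ [x])
      = p ++ [x] ++ pvScan x ws := by
  induction ws with
  | nil => intro p x; simp [pvScan]
  | cons w ws ih =>
    intro p x
    simp only [List.foldl_cons, PySem.List.pyGetD_neg_one_append_singleton, pvVowelB_eq_A]
    rw [pvVowelB_eq_A] at ih
    have hf : (if pvIsVowelWordA w then (1 : Int) else 0) = pvFlag w := rfl
    rw [hf, ih (p ++ [x]) (x + pvFlag w)]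
    simp [pvScan]

lemma pvScan_get (ws : List String) : ∀ (s : Int) (k : Nat), k ≤ ws.length →
    (s :: pvScan s ws)[k]? = some (s + ((ws.take k).map pvFlag).sum) := by
  induction ws with
  | nil =>
    intro s k hk
    have : k = 0 := by simpa using hk
    subst this
    simp [pvScan]
  | cons w ws ih =>
    intro s k hk
    cases k with
    | zero => simp
    | succ k =>
      have hk' : k ≤ ws.length := by simpa using hk
      have := ih (s + pvFlag w) k hk'
      simp only [pvScan, List.getElem?_cons_succ] at *
      rw [this]
      simp [add_assoc]

-- pyGetD on the prefix list equals the partial sum of flags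
lemma pvPref_getD (words : List String) (i : Int) (h0 : 0 ≤ i) (h1 : i ≤ (words.length : Int)) :
    PySem.List.pyGetD (0 :: pvScan 0 words) i 0 = ((words.take i.toNat).map pvFlag).sum := by
  have hlen : ((0 :: pvScan 0 words).length : Int) = (words.length : Int) + 1 := by
    simp [pvScan_length]
  have hlt : i < ((0 :: pvScan 0 words).length : Int) := by omega
  rw [PySem.List.pyGetD_eq_getElem _ _ h0 hlt]
  have hk : i.toNat ≤ words.length := by omega
  have hget := pvScan_get words 0 i.toNat hk
  have hklt : i.toNat < (0 :: pvScan 0 words).length := by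
    simp [pvScan_length]; omega
  rw [List.getElem?_eq_getElem hklt] at hget
  simpa using hget

-- A's inner scan over range l..l+k-1 equals the difference of partial sums
lemma pvCount_range (words : List String) (k : Nat) : ∀ (l : Int), 0 ≤ l → l + k ≤ (words.length : Int) →
    (PySem.List.pyRange l (l + k) 1).foldl
        (fun t i => if PySem.List.pyGetD (words.map pvIsVowelWordA) i false then t + 1 else t) 0
      = ((words.take (l + k).toNat).map pvFlag).sum - ((words.take l.toNat).map pvFlag).sum := by
  induction k with
  | zero =>
    intro l h0 hn
    rw [show l + (0 : Nat) = l by omega, PySem.List.pyRange_one_eq_nil le_rfl]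
    simp
  | succ k ih =>
    intro l h0 hn
    have h1 : l + (k : Int) ≤ (words.length : Int) := by push_cast at hn ⊢; omega
    have hcons : l + ((k + 1 : Nat) : Int) = (l + k) + 1 := by push_cast; ring
    rw [hcons, PySem.List.pyRange_one_succ_right (by omega), List.foldl_append]
    rw [ih l h0 h1]
    have hm0 : (0 : Int) ≤ l + k := by omega
    have hmlt : l + (k : Int) < ((words.map pvIsVowelWordA).length : Int) := by
      simp; push_cast at hn; omega
    rw [List.foldl_cons, List.foldl_nil,
        PySem.List.pyGetD_eq_getElem _ _ hm0 hmlt]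
    have hmlt' : (l + (k : Int)).toNat < words.length := by push_cast at hn; omega
    have hL : ((l + (k : Int)).toNat) < (words.map pvFlag).length := by simpa using hmlt'
    have hsum : ((words.take ((l + k) + 1).toNat).map pvFlag).sum
        = ((words.take (l + (k : Int)).toNat).map pvFlag).sum + pvFlag words[(l + (k : Int)).toNat] := by
      have htn : ((l + (k : Int)) + 1).toNat = (l + (k : Int)).toNat + 1 := by omega
      rw [htn, List.map_take, List.map_take, List.sum_take_succ _ _ hL, List.getElem_map]
    rw [hsum]
    rw [List.getElem_map]
    unfold pvFlag
    split_ifs <;> ring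

-- ===== VERDICT (by name: the statement is the Claim_ definition above) =====
theorem vowelStrings1_spec : Claim_equal_vowelStrings1 := by
  intro words queries _ hpre
  unfold Spec_vowelStrings1 vowelStrings1 vowelStrings1_alt
  simp only []
  rw [PySem.List.foldl_append_singleton_eq_map]
  have hpref : words.foldl
      (fun p w => p ++ [PySem.List.pyGetD p (-1) 0 + (if pvIsVowelWordB w then 1 else 0)]) [0]
      = 0 :: pvScan 0 words := by
    have := pvFold_scan words [] 0
    simpa using this
  rw [hpref, List.nil_append]
  apply List.map_congr_left
  intro q hq
  obtain ⟨-, hq2⟩ := hpre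
  obtain ⟨-, hcase⟩ := hq2 q hq
  set l := PySem.List.pyGetD q 0 0 with hldef
  set r := PySem.List.pyGetD q (-1) 0 with hrdef
  by_cases hlr : l ≤ r
  · obtain ⟨hl0, hrn⟩ := hcase.resolve_left (by omega)
    rw [if_pos hlr]
    have hk : r + 1 = l + ((r + 1 - l).toNat : Int) := by omega
    rw [show PySem.List.pyRange l (r + 1) 1 = PySem.List.pyRange l (l + ((r + 1 - l).toNat : Int)) 1 by rw [← hk]]
    rw [pvCount_range words (r + 1 - l).toNat l hl0 (by omega)]
    rw [pvPref_getD words (r + 1) (by omega) (by omega), pvPref_getD words l hl0 (by omega)]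
    rw [show (l + ((r + 1 - l).toNat : Int)).toNat = (r + 1).toNat by omega]
  · rw [if_neg hlr, PySem.List.pyRange_one_eq_nil (by omega), List.foldl_nil]
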